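-- pv_equiv track=rewrite | github.com/haseebsultankhan/ISO27001_Compliance_Check | survey_question_analysis.py | smart_sort_options
-- ===== SOURCE A (Python) =====
-- def smart_sort_options(options):
--     """Smart sorting: positive first, negative middle, uncertain last"""
--     positive, negative, uncertain = [], [], []
--     for opt in options:
--         opt_lower = opt.lower()
--         if any(word in opt_lower for word in ['not sure', 'maybe', 'unknown', 'uncertain']):
--             uncertain.append(opt)
--         elif any(word in opt_lower for word in ['no', 'not applicable', 'never', 'none']):
--             negative.append(opt)
--         else:
--             positive.append(opt)
--     return sorted(positive) + sorted(negative) + sorted(uncertain)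
-- ===== SOURCE B (Python) =====
-- def _rank(opt):
--     low = opt.lower()
--     if any(word in low for word in ['not sure', 'maybe', 'unknown', 'uncertain']):
--         return 2
--     if any(word in low for word in ['no', 'not applicable', 'never', 'none']):
--         return 1
--     return 0
--
--
-- def smart_sort_options(options):
--     """Smart sorting: positive first, negative middle, uncertain last"""
--     return sorted(options, key=lambda opt: (_rank(opt), opt))
-- ===== Notes on version B (the rewrite author's own statement) =====
-- stated objective: idiomatic
-- what changed: Replaces the partition-into-three-lists-then-sort-each-and-concatenate loop with a single sorted() call over a composite key (rank(opt), opt), where rank reproduces the uncertain/negative/positive classification.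
import Mathlib
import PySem

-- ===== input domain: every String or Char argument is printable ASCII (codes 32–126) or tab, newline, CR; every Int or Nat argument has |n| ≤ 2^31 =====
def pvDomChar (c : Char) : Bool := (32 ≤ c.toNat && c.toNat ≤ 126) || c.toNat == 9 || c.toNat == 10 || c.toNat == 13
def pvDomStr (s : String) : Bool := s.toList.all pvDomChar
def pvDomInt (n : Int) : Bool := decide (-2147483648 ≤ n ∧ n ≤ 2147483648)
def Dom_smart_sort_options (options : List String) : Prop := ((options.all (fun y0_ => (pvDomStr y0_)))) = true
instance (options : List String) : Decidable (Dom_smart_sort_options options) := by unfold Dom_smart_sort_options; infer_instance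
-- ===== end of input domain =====

-- B replaces A's partition-into-three-lists-then-sort-each with one sorted() over the composite key (rank, option); idiomatic, same cost.

-- ===== PORT A =====
-- literal transliteration of A: partition into positive/negative/uncertain, sort each, concatenate
def smart_sort_options (options : List String) : List String :=
  let st := options.foldl (fun acc opt =>
    let opt_lower := PySem.Str.lower opt
    if (["not sure", "maybe", "unknown", "uncertain"].any (fun word => PySem.Str.isIn word opt_lower)) then
      (acc.1, acc.2.1, acc.2.2 ++ [opt])
    else if (["no", "not applicable", "never", "none"].any (fun word => PySem.Str.isIn word opt_lower)) then
      (acc.1, acc.2.1 ++ [opt], acc.2.2)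
    else
      (acc.1 ++ [opt], acc.2.1, acc.2.2)) ([], [], [])
  PySem.List.sorted st.1 (fun x => x) ++ PySem.List.sorted st.2.1 (fun x => x) ++ PySem.List.sorted st.2.2 (fun x => x)

-- ===== PORT B =====
-- Source B's _rank helper
def pvRank (opt : String) : Int :=
  let low := PySem.Str.lower opt
  if (["not sure", "maybe", "unknown", "uncertain"].any (fun word => PySem.Str.isIn word low)) then 2
  else if (["no", "not applicable", "never", "none"].any (fun word => PySem.Str.isIn word low)) then 1
  else 0

-- sorted(options, key=lambda opt: (_rank(opt), opt))
def smart_sort_options_alt (options : List String) : List String :=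
  PySem.List.sorted2 options pvRank (fun x => x)

-- ===== PRECONDITION & SPEC =====
def Spec_smart_sort_options (options : List String) (out : List String) : Prop := out = smart_sort_options_alt options
instance (options : List String) (out : List String) : Decidable (Spec_smart_sort_options options out) := by unfold Spec_smart_sort_options; infer_instance

-- ===== CLAIM (what is proved, stated in full; the proofs are below) =====
def Claim_equal_smart_sort_options : Prop := ∀ (options : List String), Dom_smart_sort_options options → Spec_smart_sort_options options (smart_sort_options options)

-- ===== LEMMAS AND PROOFS =====

-- the composite key B sorts by, as a linearly ordered (lexicographic) value
def pvKey (s : String) : Lex (Int × String) := toLex (pvRank s, s)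

theorem pvKey_injective : Function.Injective pvKey := by
  intro a b h
  exact congrArg (fun x => (ofLex x).2) h

theorem pvKey_le_of_rank_lt {a b : String} (h : pvRank a < pvRank b) : pvKey a ≤ pvKey b := by
  exact le_of_lt (Prod.Lex.toLex_lt_toLex.mpr (Or.inl h))

theorem pvKey_le_of_rank_eq {a b : String} (hr : pvRank a = pvRank b) (h : a ≤ b) :
    pvKey a ≤ pvKey b := by
  exact Prod.Lex.toLex_le_toLex.mpr (Or.inr ⟨hr, h⟩)

-- A's partition loop, characterised: each bucket is a filter of the input by rank
theorem pvFold_eq (options p n u : List String) :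
    options.foldl (fun acc opt =>
      let opt_lower := PySem.Str.lower opt
      if (["not sure", "maybe", "unknown", "uncertain"].any (fun word => PySem.Str.isIn word opt_lower)) then
        (acc.1, acc.2.1, acc.2.2 ++ [opt])
      else if (["no", "not applicable", "never", "none"].any (fun word => PySem.Str.isIn word opt_lower)) then
        (acc.1, acc.2.1 ++ [opt], acc.2.2)
      else
        (acc.1 ++ [opt], acc.2.1, acc.2.2)) (p, n, u)
    = (p ++ options.filter (fun s => decide (pvRank s = 0)),
       n ++ options.filter (fun s => decide (pvRank s = 1)),
       u ++ options.filter (fun s => decide (pvRank s = 2))) := by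
  induction options generalizing p n u with
  | nil => simp
  | cons x xs ih =>
    by_cases h2 : (["not sure", "maybe", "unknown", "uncertain"].any
        (fun word => PySem.Str.isIn word (PySem.Str.lower x))) = true
    · simp only [List.foldl_cons, List.filter_cons, pvRank, h2, if_true, ih]
      simp
    · by_cases h1 : (["no", "not applicable", "never", "none"].any
          (fun word => PySem.Str.isIn word (PySem.Str.lower x))) = true
      · simp only [List.foldl_cons, List.filter_cons, pvRank, h2, h1, if_true, ih]
        simp
      · simp only [List.foldl_cons, List.filter_cons, pvRank, h2, h1, ih]
        simp

-- the three rank-filters together are a permutation of the input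
theorem pvRank_cases (s : String) : pvRank s = 0 ∨ pvRank s = 1 ∨ pvRank s = 2 := by
  simp only [pvRank]
  split_ifs <;> simp

theorem pvFilters_perm (options : List String) :
    ((options.filter (fun s => decide (pvRank s = 0))) ++
     (options.filter (fun s => decide (pvRank s = 1))) ++
     (options.filter (fun s => decide (pvRank s = 2)))).Perm options := by
  rw [List.perm_iff_count]
  intro a
  have hz : ∀ (p : String → Bool), p a = false → List.count a (options.filter p) = 0 := by
    intro p hp
    refine List.count_eq_zero.mpr (fun hm => ?_)
    rw [List.mem_filter] at hm
    rw [hm.2] at hp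
    exact Bool.true_eq_false.mp hp
  simp only [List.count_append]
  rcases pvRank_cases a with h | h | h
  · rw [List.count_filter (p := fun s => decide (pvRank s = 0)) (by simp only [h]; decide),
        hz (fun s => decide (pvRank s = 1)) (by simp only [h]; decide),
        hz (fun s => decide (pvRank s = 2)) (by simp only [h]; decide)]
    omega
  · rw [List.count_filter (p := fun s => decide (pvRank s = 1)) (by simp only [h]; decide),
        hz (fun s => decide (pvRank s = 0)) (by simp only [h]; decide),
        hz (fun s => decide (pvRank s = 2)) (by simp only [h]; decide)]
    omega
  · rw [List.count_filter (p := fun s => decide (pvRank s = 2)) (by simp only [h]; decide),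
        hz (fun s => decide (pvRank s = 0)) (by simp only [h]; decide),
        hz (fun s => decide (pvRank s = 1)) (by simp only [h]; decide)]
    omega

-- a block sorted(filter rank = i) is pairwise ≤ under the composite key, and its members have rank i
theorem pvBlock_rank {l : List String} {i : Int} {s : String} (hs : s ∈ PySem.List.sorted (List.filter (fun t => decide (pvRank t = i)) l) (fun x => x)) :
    pvRank s = i := by
  have h1 := (PySem.List.mem_sorted _ _ _ _).mp hs
  have h2 := List.of_mem_filter h1
  simpa using h2

theorem pvBlock_pairwise (l : List String) (i : Int) :
    (PySem.List.sorted (List.filter (fun t => decide (pvRank t = i)) l) (fun x => x)).Pairwise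
      (fun a b => pvKey a ≤ pvKey b) := by
  refine (PySem.List.sorted_pairwise (List.filter (fun t => decide (pvRank t = i)) l) (fun x => x)).imp_of_mem ?_
  intro a b ha hb hle
  exact pvKey_le_of_rank_eq ((pvBlock_rank ha).trans (pvBlock_rank hb).symm) hle

-- A's result is pairwise ≤ under the composite key
theorem pvA_pairwise (options : List String) :
    (smart_sort_options options).Pairwise (fun a b => pvKey a ≤ pvKey b) := by
  unfold smart_sort_options
  rw [pvFold_eq options [] [] []]
  simp only [List.nil_append]
  rw [List.pairwise_append]
  refine ⟨by rw [List.pairwise_append]; exact ⟨pvBlock_pairwise options 0, pvBlock_pairwise options 1,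
    fun a ha b hb => pvKey_le_of_rank_lt (by rw [pvBlock_rank ha, pvBlock_rank hb]; norm_num)⟩,
    pvBlock_pairwise options 2, ?_⟩
  intro a ha b hb
  have hb2 : pvRank b = 2 := pvBlock_rank hb
  rcases List.mem_append.mp ha with h0 | h1
  · exact pvKey_le_of_rank_lt (by rw [pvBlock_rank h0, hb2]; norm_num)
  · exact pvKey_le_of_rank_lt (by rw [pvBlock_rank h1, hb2]; norm_num)

-- A's result is a permutation of the input
theorem pvA_perm (options : List String) : (smart_sort_options options).Perm options := by
  unfold smart_sort_options
  rw [pvFold_eq options [] [] []]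
  simp only [List.nil_append]
  refine List.Perm.trans ?_ (pvFilters_perm options)
  exact List.Perm.append (List.Perm.append
    (PySem.List.sorted_perm _ _ _) (PySem.List.sorted_perm _ _ _)) (PySem.List.sorted_perm _ _ _)

-- B's sorted2 with keys (pvRank, id) IS sorted with the single lexicographic key pvKey
theorem pvB_eq_sorted_key (options : List String) :
    smart_sort_options_alt options = PySem.List.sorted options pvKey := by
  unfold smart_sort_options_alt
  rw [PySem.List.sorted_eq_foldl_insertBy options pvKey]
  simp only [PySem.List.sorted2, if_neg (by simp : ¬ (false = true))]
  congr 1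
  funext acc x
  congr 1
  funext a b
  have hiff : (pvKey a < pvKey b) ↔ (pvRank a < pvRank b ∨ (pvRank a = pvRank b ∧ a < b)) :=
    Prod.Lex.toLex_lt_toLex
  rcases lt_trichotomy (pvRank a) (pvRank b) with h | h | h
  · simp [h, hiff]
  · simp [h, hiff]
  · have h1 : ¬ pvRank a < pvRank b := by omega
    have h2 : pvRank a ≠ pvRank b := by omega
    simp [h, h1, h2, hiff]

theorem pvB_pairwise (options : List String) :
    (smart_sort_options_alt options).Pairwise (fun a b => pvKey a ≤ pvKey b) := by
  rw [pvB_eq_sorted_key]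
  exact PySem.List.sorted_pairwise options pvKey

theorem pvB_perm (options : List String) : (smart_sort_options_alt options).Perm options := by
  rw [pvB_eq_sorted_key]
  exact PySem.List.sorted_perm options pvKey false

-- ===== VERDICT (by name: the statement is the Claim_ definition above) =====
theorem smart_sort_options_spec : Claim_equal_smart_sort_options := by
  intro options _
  unfold Spec_smart_sort_options
  exact PySem.List.eq_of_perm_of_pairwise_le_of_injective pvKey pvKey_injective
    ((pvA_perm options).trans (pvB_perm options).symm)
    (pvA_pairwise options) (pvB_pairwise options)
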